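-- pv_equiv track=rewrite | github.com/marmoure/friday | simJaker/encode.py | encode_phone_number
-- ===== SOURCE A (Python) =====
-- def encode_phone_number(phone_number):
--     # Ensure the phone number is in international format
--     if not phone_number.startswith('+'):
--         phone_number = '+' + phone_number
--
--     # Remove the '+' sign for encoding
--     phone_number = phone_number[1:]
--
--     # Add the length of the phone number in semi-octets
--     length = len(phone_number)
--
--     # Add the type of number (TON) and numbering plan identification (NPI)
--     # 0x91 indicates international number
--     encoded_number = '{:02X}91'.format(length)
--
--     # Convert the phone number to BCD and swap nibbles
--     for i in range(0, len(phone_number), 2):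
--         if i + 1 < len(phone_number):
--             encoded_number += phone_number[i+1] + phone_number[i]
--         else:
--             encoded_number += 'F' + phone_number[i]
--
--     return encoded_number
-- ===== SOURCE B (Python) =====
-- def encode_phone_number(phone_number):
--     digits = phone_number[1:] if phone_number.startswith('+') else phone_number
--     parts = ['{:02X}91'.format(len(digits))]
--     rest = digits
--     while len(rest) >= 2:
--         parts.append(rest[1] + rest[0])
--         rest = rest[2:]
--     if rest:
--         parts.append('F' + rest)
--     return ''.join(parts)
-- ===== Notes on version B (the rewrite author's own statement) =====
-- stated objective: alternative
-- what changed: A's step-2 index loop with a per-iteration bounds branch and a string-concatenation accumulator is replaced by a while loop consuming a shrinking suffix of the digits two characters at a time, collecting pair strings in a list, handling the odd trailing digit once after the loop, and joining at the end.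
import Mathlib
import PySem

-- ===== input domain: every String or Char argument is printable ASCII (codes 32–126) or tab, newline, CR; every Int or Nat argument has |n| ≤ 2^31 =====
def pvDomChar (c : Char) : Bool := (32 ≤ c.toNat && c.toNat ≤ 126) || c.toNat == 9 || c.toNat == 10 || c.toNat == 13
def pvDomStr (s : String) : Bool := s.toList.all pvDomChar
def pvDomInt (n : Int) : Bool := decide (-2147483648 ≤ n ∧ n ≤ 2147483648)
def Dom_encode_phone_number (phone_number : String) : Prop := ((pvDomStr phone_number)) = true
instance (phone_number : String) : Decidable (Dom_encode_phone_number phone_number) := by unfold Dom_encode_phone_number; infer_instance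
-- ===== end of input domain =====

-- B replaces A's step-2 index loop (with its 'i+1 < len' branch) by structural recursion
-- consuming two characters at a time; objective: simpler.

-- shared header helper: '{:02X}'.format(n) for n ≥ 0 — uppercase hex digits, zero-padded to width 2
def pvHexChar (n : Nat) : Char := if n < 10 then Char.ofNat (48 + n) else Char.ofNat (55 + n)

def pvHexChars (n : Nat) : List Char :=
  if _h : n < 16 then [pvHexChar n]
  else pvHexChars (n / 16) ++ [pvHexChar (n % 16)]
  decreasing_by exact Nat.div_lt_self (by omega) (by omega)

def pvFmt02X (n : Nat) : List Char :=
  let ds := pvHexChars n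
  if ds.length < 2 then '0' :: ds else ds

-- ===== PORT A =====
def encode_phone_number (phone_number : String) : String :=
  let cs0 := phone_number.toList
  -- if not phone_number.startswith('+'): phone_number = '+' + phone_number
  let cs1 := if ¬ (PySem.Chars.startswith cs0 ['+'] = true) then '+' :: cs0 else cs0
  -- phone_number = phone_number[1:]
  let cs := PySem.List.slice cs1 (some 1) none
  -- encoded_number = '{:02X}91'.format(length)  (exact for the nonnegative len here)
  let header := pvFmt02X cs.length ++ ['9', '1']
  -- the step-2 index loop over the digits
  let body := (PySem.List.pyRange 0 (PySem.List.len cs) 2).foldl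
    (fun acc i =>
      if i + 1 < PySem.List.len cs then
        acc ++ [PySem.List.pyGetD cs (i + 1) ' ', PySem.List.pyGetD cs i ' ']
      else
        acc ++ ['F', PySem.List.pyGetD cs i ' '])
    header
  String.ofList body

-- ===== PORT B =====
-- while len(rest) >= 2: parts.append(rest[1] + rest[0]); rest = rest[2:]
-- then (after the loop): if rest: parts.append('F' + rest)
def pvSwapLoop (rest : List Char) (parts : List (List Char)) : List (List Char) :=
  if _h : 2 ≤ rest.length then
    pvSwapLoop (PySem.List.slice rest (some 2) none)
      (parts ++ [[PySem.List.pyGetD rest 1 ' ', PySem.List.pyGetD rest 0 ' ']])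
  else if rest ≠ [] then parts ++ ['F' :: rest] else parts
  termination_by rest.length
  decreasing_by
    rw [PySem.List.slice_from rest (by norm_num)]
    simp
    omega

def encode_phone_number_alt (phone_number : String) : String :=
  let cs0 := phone_number.toList
  let digits := if PySem.Chars.startswith cs0 ['+'] = true then PySem.List.slice cs0 (some 1) none else cs0
  let parts := pvSwapLoop digits [pvFmt02X digits.length ++ ['9', '1']]
  String.ofList parts.flatten   -- ''.join(parts)

-- ===== PRECONDITION & SPEC =====
def Spec_encode_phone_number (phone_number : String) (out : String) : Prop := out = encode_phone_number_alt phone_number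
instance (phone_number : String) (out : String) : Decidable (Spec_encode_phone_number phone_number out) := by unfold Spec_encode_phone_number; infer_instance

-- ===== CLAIM (what is proved, stated in full; the proofs are below) =====
def Claim_equal_encode_phone_number : Prop := ∀ (phone_number : String), Dom_encode_phone_number phone_number → Spec_encode_phone_number phone_number (encode_phone_number phone_number)

-- ===== LEMMAS AND PROOFS =====

-- proof-side characterisation of the pair-swapped body
def pvPairs : List Char → List Char
  | a :: b :: rest => b :: a :: pvPairs rest
  | [a] => ['F', a]
  | [] => []

-- pvSwapLoop appends exactly the pair-swapped body to the collected parts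
theorem pvSwapLoop_flatten (m : Nat) : ∀ (rest : List Char) (parts : List (List Char)), rest.length ≤ m →
    (pvSwapLoop rest parts).flatten = parts.flatten ++ pvPairs rest := by
  induction m with
  | zero =>
    intro rest parts hm
    have : rest = [] := List.eq_nil_of_length_eq_zero (by omega)
    subst this
    rw [pvSwapLoop]
    simp [pvPairs]
  | succ m ih =>
    intro rest parts hm
    match rest with
    | [] => rw [pvSwapLoop]; simp [pvPairs]
    | [a] => rw [pvSwapLoop]; simp [pvPairs]
    | a :: b :: rest' =>
      rw [pvSwapLoop]
      rw [dif_pos (by simp)]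
      rw [PySem.List.slice_from _ (by norm_num)]
      rw [ih _ _ (by simp at hm ⊢; omega)]
      simp [pvPairs, PySem.List.pyGetD_ofNat']

theorem pyRange_two_cons (a b : Int) (h : a < b) :
    PySem.List.pyRange a b 2 = a :: PySem.List.pyRange (a + 2) b 2 := by
  rw [PySem.List.pyRange_of_pos _ _ (by norm_num), PySem.List.pyRange_of_pos _ _ (by norm_num)]
  have hn : ((b - a + 2 - 1) / 2).toNat = (if a + 2 < b then ((b - (a + 2) + 2 - 1) / 2).toNat else 0) + 1 := by
    split_ifs with h2 <;> omega
  rw [if_pos h, hn]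
  rw [List.range_succ_eq_map, List.map_cons, List.map_map]
  simp [Function.comp]
  intro k _; ring

theorem pyRange_two_nil (a b : Int) (h : b ≤ a) : PySem.List.pyRange a b 2 = [] := by
  rw [PySem.List.pyRange_of_pos _ _ (by norm_num), if_neg (by omega)]
  simp

-- A's step-2 index loop over cs, started at index 2*k, appends exactly pvPairs (cs.drop (2*k))
theorem pvLoop (cs : List Char) (m : Nat) : ∀ (k : Nat) (acc : List Char), cs.length - 2 * k ≤ m →
    (PySem.List.pyRange (2 * (k : Int)) (PySem.List.len cs) 2).foldl
      (fun acc i =>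
        if i + 1 < PySem.List.len cs then
          acc ++ [PySem.List.pyGetD cs (i + 1) ' ', PySem.List.pyGetD cs i ' ']
        else
          acc ++ ['F', PySem.List.pyGetD cs i ' ']) acc
    = acc ++ pvPairs (cs.drop (2 * k)) := by
  induction m with
  | zero =>
    intro k acc hm
    have hlen : cs.length ≤ 2 * k := by omega
    rw [PySem.List.len_eq, pyRange_two_nil _ _ (by exact_mod_cast hlen),
      List.drop_eq_nil_of_le hlen]
    simp [pvPairs]
  | succ m ih =>
    intro k acc hm
    by_cases hk : cs.length ≤ 2 * k
    · rw [PySem.List.len_eq, pyRange_two_nil _ _ (by exact_mod_cast hk),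
        List.drop_eq_nil_of_le hk]
      simp [pvPairs]
    · have hlt : 2 * k < cs.length := by omega
      rw [PySem.List.len_eq, pyRange_two_cons _ _ (by exact_mod_cast hlt), List.foldl_cons]
      have hidx : (2 * (k : Int)) = ((2 * k : Nat) : Int) := by omega
      by_cases h1 : 2 * k + 1 < cs.length
      · have hif : (2 * (k : Int)) + 1 < ((cs.length : Nat) : Int) := by
          push_cast; omega
        rw [if_pos hif]
        have hidx1 : (2 * (k : Int)) + 1 = ((2 * k + 1 : Nat) : Int) := by omega
        rw [hidx1, hidx]
        rw [PySem.List.pyGetD_natCast cs (2 * k + 1) ' ']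
        rw [PySem.List.pyGetD_natCast cs (2 * k) ' ']
        rw [List.getD_eq_getElem cs ' ' h1]
        rw [List.getD_eq_getElem cs ' ' hlt]
        have hdrop : cs.drop (2 * k) = cs[2 * k] :: cs[2 * k + 1] :: cs.drop (2 * (k + 1)) := by
          have h2 : 2 * (k + 1) = 2 * k + 1 + 1 := by ring
          rw [h2, List.drop_eq_getElem_cons hlt, List.drop_eq_getElem_cons h1]
        have hstep : ((2 * k : Nat) : Int) + 2 = 2 * ((k + 1 : Nat) : Int) := by omega
        rw [hstep]
        rw [← PySem.List.len_eq]
        rw [ih (k + 1) _ (by omega)]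
        rw [hdrop]
        simp [pvPairs]
      · have hif : ¬ ((2 * (k : Int)) + 1 < ((cs.length : Nat) : Int)) := by
          push_cast; omega
        rw [if_neg hif, hidx]
        rw [PySem.List.pyGetD_natCast cs (2 * k) ' ']
        rw [List.getD_eq_getElem cs ' ' hlt]
        have hlast : cs.length = 2 * k + 1 := by omega
        have hdrop : cs.drop (2 * k) = [cs[2 * k]] := by
          rw [List.drop_eq_getElem_cons hlt]
          congr 1
          apply List.drop_eq_nil_of_le; omega
        rw [pyRange_two_nil _ _ (by push_cast; omega), List.foldl_nil, hdrop]
        simp [pvPairs]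

-- the two '+'-normalizations produce the same digit list
theorem pvDigits_eq (cs0 : List Char) :
    PySem.List.slice (if ¬ (PySem.Chars.startswith cs0 ['+'] = true) then '+' :: cs0 else cs0) (some 1) none
    = (if PySem.Chars.startswith cs0 ['+'] = true then PySem.List.slice cs0 (some 1) none else cs0) := by
  by_cases h : PySem.Chars.startswith cs0 ['+'] = true
  · simp [h]
  · simp [h, PySem.List.slice_from_one]

-- ===== VERDICT (by name: the statement is the Claim_ definition above) =====
theorem encode_phone_number_spec : Claim_equal_encode_phone_number := by
  intro s _
  unfold Spec_encode_phone_number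
  simp only [encode_phone_number, encode_phone_number_alt]
  rw [← pvDigits_eq s.toList]
  set cs := PySem.List.slice (if ¬ (PySem.Chars.startswith s.toList ['+'] = true) then '+' :: s.toList else s.toList) (some 1) none with hcs
  have h0 : (0 : Int) = 2 * ((0 : Nat) : Int) := by norm_num
  rw [h0, pvLoop cs cs.length 0 _ (by omega)]
  rw [pvSwapLoop_flatten cs.length cs _ (by omega)]
  simp
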